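-- pv_equiv track=rewrite | github.com/MaxSkupch/app.repetioai.com | server.py | create_index_values_prompt_list_from_input
-- ===== SOURCE A (Python) =====
-- from itertools import product
--
-- def create_index_values_prompt_list_from_input(text_segments: list, variable_values: list) -> list:
--
--     if variable_values == []: return [[0,['NO VARIABLES'], text_segments[0]]]
--
--     variable_value_combinations = list(product(*variable_values))
--
--     index_values_prompt_list = []
--     i = 0
--     for values in variable_value_combinations:
--         prompt = ""
--
--         for j in range(len(values)):
--             prompt += f'{text_segments[j]}{values[j]}'
--
--         if len(text_segments) > len(values):
--             prompt += text_segments[len(values)]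
--
--         index_values_prompt_list.append([i, list(values), prompt])
--         i += 1
--
--     return index_values_prompt_list
-- ===== SOURCE B (Python) =====
-- def create_index_values_prompt_list_from_input(text_segments: list, variable_values: list) -> list:
--
--     if variable_values == []: return [[0, ['NO VARIABLES'], text_segments[0]]]
--
--     if any(vs == [] for vs in variable_values): return []
--
--     n = len(variable_values)
--
--     def dfs(d, prompt):
--         # depth-first over variable_values, threading the partial prompt
--         if d == n:
--             if len(text_segments) > d:
--                 prompt += text_segments[d]
--             return [([], prompt)]
--         seg = text_segments[d]
--         return [([v] + vals, p)
--                 for v in variable_values[d]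
--                 for (vals, p) in dfs(d + 1, f'{prompt}{seg}{v}')]
--
--     return [[i, vals, p] for i, (vals, p) in enumerate(dfs(0, ""))]
-- ===== Notes on version B (the rewrite author's own statement) =====
-- stated objective: alternative
-- what changed: Replaced itertools.product plus a per-combination index-driven prompt rebuild with a recursive depth-first traversal of variable_values that threads the partial prompt and prepends values on the way out, with the index attached by enumerate at the end.
import Mathlib
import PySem

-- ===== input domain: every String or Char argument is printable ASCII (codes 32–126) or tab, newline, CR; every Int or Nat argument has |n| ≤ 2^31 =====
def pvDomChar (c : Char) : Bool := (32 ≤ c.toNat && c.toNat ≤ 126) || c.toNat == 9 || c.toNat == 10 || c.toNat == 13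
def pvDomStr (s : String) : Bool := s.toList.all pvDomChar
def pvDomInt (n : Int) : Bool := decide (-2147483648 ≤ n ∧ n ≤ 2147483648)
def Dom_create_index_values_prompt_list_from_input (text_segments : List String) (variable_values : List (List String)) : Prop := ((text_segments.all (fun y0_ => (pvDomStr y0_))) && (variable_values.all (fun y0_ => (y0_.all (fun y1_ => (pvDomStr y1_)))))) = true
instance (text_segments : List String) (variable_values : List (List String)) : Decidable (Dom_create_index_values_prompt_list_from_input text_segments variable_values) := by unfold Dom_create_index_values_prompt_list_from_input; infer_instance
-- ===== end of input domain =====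

-- B replaces itertools.product + the per-combination prompt rebuild of A by a recursive
-- depth-first traversal that threads the growing prompt (objective: alternative decomposition).
-- Equivalence of the RETURN values is proved on Pre_ (exactly where the Python A returns).

-- ===== PORT A =====
-- itertools.product(*variable_values): all combinations, rightmost varying fastest
def pvProduct : List (List String) → List (List String)
  | [] => [[]]
  | l :: rest => l.flatMap (fun v => (pvProduct rest).map (fun c => v :: c))

def create_index_values_prompt_list_from_input (text_segments : List String) (variable_values : List (List String)) : List (Int × List String × String) :=
  if variable_values = [] then [((0 : Int), ["NO VARIABLES"], PySem.List.pyGetD text_segments 0 "")]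
  else
    let variable_value_combinations := pvProduct variable_values
    (variable_value_combinations.foldl
      (fun (st : List (Int × List String × String) × Int) values =>
        let prompt := (PySem.List.pyRange 0 (values.length : Int)).foldl
          (fun p j => p ++ PySem.List.pyGetD text_segments j "" ++ PySem.List.pyGetD values j "") ""
        let prompt := if values.length < text_segments.length
          then prompt ++ PySem.List.pyGetD text_segments (values.length : Int) "" else prompt
        (st.1 ++ [(st.2, values, prompt)], st.2 + 1))
      ([], 0)).1

-- ===== PORT B =====
-- dfs d prompt  (rest = variable_values[d:], n = len(variable_values)); returns (values, prompt) rows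
def pvDfs (ts : List String) (n : Nat) (d : Nat) (rest : List (List String)) (prompt : String) : List (List String × String) :=
  match rest with
  | [] => [( [], if n < ts.length then prompt ++ PySem.List.pyGetD ts (n : Int) "" else prompt )]
  | l :: rest' =>
    let seg := PySem.List.pyGetD ts (d : Int) ""
    l.flatMap (fun v => (pvDfs ts n (d + 1) rest' (prompt ++ seg ++ v)).map (fun r => (v :: r.1, r.2)))

def create_index_values_prompt_list_from_input_alt (text_segments : List String) (variable_values : List (List String)) : List (Int × List String × String) :=
  if variable_values = [] then [((0 : Int), ["NO VARIABLES"], PySem.List.pyGetD text_segments 0 "")]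
  else if variable_values.any (fun vs => vs = []) then []
  else (PySem.List.enumerate (pvDfs text_segments variable_values.length 0 variable_values "")).map
    (fun r => (r.1, r.2.1, r.2.2))

-- ===== PRECONDITION & SPEC =====
-- Pre_ is exactly the inputs on which the Python A returns: A raises IndexError when
-- variable_values == [] and text_segments == [], or when some combination exists
-- (every inner list nonempty) and text_segments is shorter than variable_values.
def Pre_create_index_values_prompt_list_from_input (text_segments : List String) (variable_values : List (List String)) : Prop :=
  (variable_values = [] → text_segments ≠ []) ∧
  (variable_values ≠ [] → ((∃ l ∈ variable_values, l = []) ∨ variable_values.length ≤ text_segments.length))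
instance (text_segments : List String) (variable_values : List (List String)) : Decidable (Pre_create_index_values_prompt_list_from_input text_segments variable_values) := by unfold Pre_create_index_values_prompt_list_from_input; infer_instance
def pvWitness_create_index_values_prompt_list_from_input : List String × List (List String) := (["Hello ", "!"], [["Ann", "Bob"]])

def Spec_create_index_values_prompt_list_from_input (text_segments : List String) (variable_values : List (List String)) (out : List (Int × List String × String)) : Prop := out = create_index_values_prompt_list_from_input_alt text_segments variable_values
instance (text_segments : List String) (variable_values : List (List String)) (out : List (Int × List String × String)) : Decidable (Spec_create_index_values_prompt_list_from_input text_segments variable_values out) := by unfold Spec_create_index_values_prompt_list_from_input; infer_instance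

-- ===== CLAIM (what is proved, stated in full; the proofs are below) =====
def Claim_equal_create_index_values_prompt_list_from_input : Prop := ∀ (text_segments : List String) (variable_values : List (List String)), Dom_create_index_values_prompt_list_from_input text_segments variable_values → Pre_create_index_values_prompt_list_from_input text_segments variable_values → Spec_create_index_values_prompt_list_from_input text_segments variable_values (create_index_values_prompt_list_from_input text_segments variable_values)

-- ===== LEMMAS AND PROOFS =====

-- the segments interleaved with one combination, segments taken from offset d
def pvInter (ts : List String) : Nat → List String → String
  | _, [] => ""
  | d, v :: c => PySem.List.pyGetD ts (d : Int) "" ++ v ++ pvInter ts (d + 1) c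

-- some inner list empty → no combinations
theorem pvProduct_eq_nil {vv : List (List String)} (h : ∃ l ∈ vv, l = []) : pvProduct vv = [] := by
  induction vv with
  | nil => simp at h
  | cons l rest ih =>
    rcases h with ⟨l', hl', hnil⟩
    rcases List.mem_cons.mp hl' with rfl | hmem
    · simp [pvProduct, hnil]
    · simp [pvProduct, ih ⟨l', hmem, hnil⟩]

theorem pvProduct_length {vv : List (List String)} {c : List String} (h : c ∈ pvProduct vv) : c.length = vv.length := by
  induction vv generalizing c with
  | nil => simp [pvProduct] at h; simp [h]
  | cons l rest ih =>
    simp only [pvProduct, List.mem_flatMap, List.mem_map] at h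
    rcases h with ⟨v, _, c', hc', rfl⟩
    simp [ih hc']

-- A's inner prompt loop (over Nat range, indices offset by d in ts) builds pvInter
theorem pvRangeFold_eq_inter (ts : List String) : ∀ (c : List String) (d : Nat) (p : String),
    (List.range c.length).foldl (fun q j => q ++ ts.getD (d + j) "" ++ c.getD j "") p = p ++ pvInter ts d c := by
  intro c
  induction c with
  | nil => intro d p; simp [pvInter]
  | cons v c' ih =>
    intro d p
    have hbody : (fun (q : String) (j : Nat) => q ++ ts.getD (d + Nat.succ j) "" ++ (v :: c').getD (Nat.succ j) "")
        = (fun (q : String) (j : Nat) => q ++ ts.getD ((d + 1) + j) "" ++ c'.getD j "") := by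
      funext q j
      have : d + Nat.succ j = (d + 1) + j := by omega
      simp [this]
    calc (List.range (v :: c').length).foldl (fun q j => q ++ ts.getD (d + j) "" ++ (v :: c').getD j "") p
        = (List.map Nat.succ (List.range c'.length)).foldl (fun q j => q ++ ts.getD (d + j) "" ++ (v :: c').getD j "")
            (p ++ ts.getD (d + 0) "" ++ (v :: c').getD 0 "") := by
          simp only [List.length_cons, List.range_succ_eq_map, List.foldl_cons]
      _ = (List.range c'.length).foldl (fun q j => q ++ ts.getD ((d + 1) + j) "" ++ c'.getD j "")
            (p ++ ts.getD d "" ++ v) := by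
          rw [List.foldl_map, hbody]; simp
      _ = p ++ pvInter ts d (v :: c') := by
          rw [ih (d + 1)]
          simp [pvInter, PySem.List.pyGetD_natCast, String.append_assoc]

-- A's per-combination prompt, expressed via pvInter (d = 0)
theorem pvAPrompt_eq (ts : List String) (c : List String) :
    (PySem.List.pyRange 0 (c.length : Int)).foldl
      (fun p j => p ++ PySem.List.pyGetD ts j "" ++ PySem.List.pyGetD c j "") ""
    = pvInter ts 0 c := by
  rw [PySem.List.pyRange_zero_natCast, List.foldl_map]
  simp only [PySem.List.pyGetD_natCast]
  have := pvRangeFold_eq_inter ts c 0 ""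
  simp only [Nat.zero_add] at this
  simpa using this

-- enumerate distributes over map (specific combination of PySem.List.enumerate with List.map)
theorem pvEnumerate_map {α β : Type} (l : List α) (f : α → β) (s : Int) :
    PySem.List.enumerate (l.map f) s = (PySem.List.enumerate l s).map (fun p => (p.1, f p.2)) := by
  induction l generalizing s with
  | nil => simp [PySem.List.enumerate]
  | cons x t ih => simp [PySem.List.enumerate, ih]

-- A's accumulating loop with counter = enumerate-map
theorem pvFold_enum (P : List String → String) : ∀ (l : List (List String)) (acc : List (Int × List String × String)) (k : Int),
    (l.foldl (fun (st : List (Int × List String × String) × Int) c => (st.1 ++ [(st.2, c, P c)], st.2 + 1)) (acc, k)).1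
    = acc ++ (PySem.List.enumerate l k).map (fun p => (p.1, p.2, P p.2)) := by
  intro l
  induction l with
  | nil => intro acc k; simp [PySem.List.enumerate]
  | cons c l' ih =>
    intro acc k
    simp only [List.foldl_cons, ih, PySem.List.enumerate, List.map_cons]
    simp

-- the dfs of B = map of (combination, threaded prompt) over the product
theorem pvDfs_eq (ts : List String) (n : Nat) : ∀ (rest : List (List String)) (d : Nat) (prompt : String),
    pvDfs ts n d rest prompt
    = (pvProduct rest).map (fun c => (c, prompt ++ pvInter ts d c ++ (if n < ts.length then PySem.List.pyGetD ts (n : Int) "" else ""))) := by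
  intro rest
  induction rest with
  | nil =>
    intro d prompt
    simp only [pvDfs, pvProduct, List.map_cons, List.map_nil, pvInter]
    split <;> simp
  | cons l rest' ih =>
    intro d prompt
    simp only [pvDfs, pvProduct, List.map_flatMap, List.map_map]
    refine List.flatMap_congr ?_ -- congruence over l
    intro v _
    rw [ih]
    simp [List.map_map, Function.comp, pvInter, String.append_assoc]

theorem pvMain : ∀ (text_segments : List String) (variable_values : List (List String)),
    create_index_values_prompt_list_from_input text_segments variable_values
    = create_index_values_prompt_list_from_input_alt text_segments variable_values := by
  intro ts vv
  by_cases hnil : vv = []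
  · simp [create_index_values_prompt_list_from_input, create_index_values_prompt_list_from_input_alt, hnil]
  · by_cases hemp : ∃ l ∈ vv, l = []
    · have hprod := pvProduct_eq_nil hemp
      have hany : vv.any (fun vs => vs = []) = true := by
        rcases hemp with ⟨l, hl, rfl⟩
        rw [List.any_eq_true]; exact ⟨[], hl, by simp⟩
      simp [create_index_values_prompt_list_from_input, create_index_values_prompt_list_from_input_alt, hnil, hprod, hany]
    · have hany : vv.any (fun vs => vs = []) = false := by
        simp only [List.any_eq_false, decide_eq_true_eq]
        intro l hl hlnil; exact hemp ⟨l, hl, hlnil⟩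
      simp only [create_index_values_prompt_list_from_input, create_index_values_prompt_list_from_input_alt,
        hnil, hany, Bool.false_eq_true, if_false]
      rw [pvDfs_eq, pvEnumerate_map]
      -- A side: turn the foldl into zipIdx-map with the per-combination prompt
      have hA := pvFold_enum (fun c =>
        (if c.length < ts.length then pvInter ts 0 c ++ PySem.List.pyGetD ts (c.length : Int) "" else pvInter ts 0 c))
        (pvProduct vv) [] 0
      simp only [List.nil_append] at hA
      have hbodyA : (fun (st : List (Int × List String × String) × Int) (values : List String) =>
          (st.1 ++ [(st.2, values,
            (let prompt := (PySem.List.pyRange 0 (values.length : Int)).foldl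
              (fun p j => p ++ PySem.List.pyGetD ts j "" ++ PySem.List.pyGetD values j "") ""
             if values.length < ts.length then prompt ++ PySem.List.pyGetD ts (values.length : Int) "" else prompt))], st.2 + 1))
          = (fun (st : List (Int × List String × String) × Int) (c : List String) =>
          (st.1 ++ [(st.2, c,
            (if c.length < ts.length then pvInter ts 0 c ++ PySem.List.pyGetD ts (c.length : Int) "" else pvInter ts 0 c))], st.2 + 1)) := by
        funext st c
        simp [pvAPrompt_eq ts c]
      rw [hbodyA, hA, List.map_map]
      refine List.map_congr_left ?_
      intro p hp
      have hmem : p.2 ∈ pvProduct vv := by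
        have := PySem.List.map_snd_enumerate (pvProduct vv) 0
        exact this ▸ List.mem_map_of_mem hp
      have hlen : p.2.length = vv.length := pvProduct_length hmem
      simp only [Function.comp]
      rw [hlen]
      split
      · simp
      · simp

-- ===== VERDICT (by name: the statement is the Claim_ definition above) =====
theorem create_index_values_prompt_list_from_input_spec : Claim_equal_create_index_values_prompt_list_from_input := by
  intro ts vv _ _
  unfold Spec_create_index_values_prompt_list_from_input
  exact pvMain ts vv
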